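-- pv_equiv track=rewrite | github.com/Pooch41/snake-charmer | Classwork/forloops.py | filter_complex_words
-- ===== SOURCE A (Python) =====
-- def filter_complex_words(list_of_words):
--     """count words w/ len > 5, break if len > 10"""
--     eligible_word_count = 0
--     for word in list_of_words:
--         if len(word) > 10:
--             break
--         elif len(word) > 5:
--             eligible_word_count += 1
--
--     return eligible_word_count
-- ===== SOURCE B (Python) =====
-- from collections import Counter
--
-- def filter_complex_words(list_of_words):
--     lens = [len(w) for w in list_of_words]
--     cutoff = next((i for i, l in enumerate(lens) if l > 10), len(lens))
--     hist = Counter(lens[:cutoff])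
--     return sum(c for l, c in hist.items() if l > 5)
-- ===== Notes on version B (the rewrite author's own statement) =====
-- stated objective: alternative
-- what changed: Instead of one counting loop with a break, B maps words to their lengths, locates the cutoff index of the first length > 10, builds a Counter histogram of the prefix lengths, and returns the sum of the histogram buckets with key > 5.
import Mathlib
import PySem

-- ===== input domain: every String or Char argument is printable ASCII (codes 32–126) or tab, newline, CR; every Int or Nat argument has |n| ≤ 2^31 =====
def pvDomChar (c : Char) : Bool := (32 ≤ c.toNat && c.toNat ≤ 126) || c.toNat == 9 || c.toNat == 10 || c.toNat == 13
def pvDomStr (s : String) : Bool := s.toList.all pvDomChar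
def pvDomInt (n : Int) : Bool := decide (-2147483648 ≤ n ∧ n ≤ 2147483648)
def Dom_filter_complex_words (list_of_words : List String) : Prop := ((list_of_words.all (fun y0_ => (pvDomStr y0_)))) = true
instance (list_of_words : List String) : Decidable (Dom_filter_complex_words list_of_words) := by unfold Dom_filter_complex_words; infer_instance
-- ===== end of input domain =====

-- B replaces A's single counting loop with a break by a staged pipeline: map words to
-- lengths, find the cutoff index of the first length > 10, histogram the prefix lengths
-- with a Counter, and sum the buckets whose key is > 5; same result, alternative structure.

-- ===== PORT A =====
-- A's for-loop with break, counter accumulator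
def filterComplexLoop (ws : List String) (acc : Int) : Int :=
  match ws with
  | [] => acc
  | w :: rest =>
    if PySem.Str.len w > 10 then acc
    else if PySem.Str.len w > 5 then filterComplexLoop rest (acc + 1)
    else filterComplexLoop rest acc

def filter_complex_words (list_of_words : List String) : Int :=
  filterComplexLoop list_of_words 0

-- ===== PORT B =====
-- next((i for i, l in enumerate(lens) if l > 10), len(lens)): first index with l > 10, default length
def findCutoff (lens : List Int) : Nat :=
  match lens with
  | [] => 0
  | l :: rest => if l > 10 then 0 else findCutoff rest + 1

def filter_complex_words_alt (list_of_words : List String) : Int :=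
  let lens := list_of_words.map PySem.Str.len
  let cutoff := findCutoff lens
  let hist := PySem.Dict.counter (lens.take cutoff)  -- lens[:cutoff] with 0 ≤ cutoff ≤ len(lens) is List.take
  hist.items.foldl (fun s p => if p.1 > 5 then s + p.2 else s) 0

-- ===== PRECONDITION & SPEC =====
def Spec_filter_complex_words (list_of_words : List String) (out : Int) : Prop := out = filter_complex_words_alt list_of_words
instance (list_of_words : List String) (out : Int) : Decidable (Spec_filter_complex_words list_of_words out) := by unfold Spec_filter_complex_words; infer_instance

-- ===== CLAIM (what is proved, stated in full; the proofs are below) =====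
def Claim_equal_filter_complex_words : Prop := ∀ (list_of_words : List String), Dom_filter_complex_words list_of_words → Spec_filter_complex_words list_of_words (filter_complex_words list_of_words)

-- ===== LEMMAS AND PROOFS =====

-- A's loop counts the >5 words in the ≤10-prefix
theorem filterComplexLoop_eq (ws : List String) (acc : Int) :
    filterComplexLoop ws acc =
      acc + (((ws.takeWhile (fun w => PySem.Str.len w ≤ 10)).filter
        (fun w => PySem.Str.len w > 5)).length : Int) := by
  induction ws generalizing acc with
  | nil => simp [filterComplexLoop]
  | cons w rest ih =>
    by_cases h10 : PySem.Str.len w > 10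
    · have h10n : 10 < w.length := by
        simp only [PySem.Str.len_eq, String.length_toList] at h10; exact_mod_cast h10
      simp [filterComplexLoop, PySem.Str.len_eq, String.length_toList, h10n,
        show ¬ w.length ≤ 10 by omega]
    · have h10n : w.length ≤ 10 := by
        simp only [PySem.Str.len_eq, String.length_toList] at h10; omega
      by_cases h5 : PySem.Str.len w > 5
      · have h5n : 5 < w.length := by
          simp only [PySem.Str.len_eq, String.length_toList] at h5; exact_mod_cast h5
        simp [filterComplexLoop, PySem.Str.len_eq, String.length_toList,
          show ¬ 10 < w.length by omega, h5n, h10n, List.filter_cons, ih]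
        push_cast
        ring
      · have h5n : ¬ 5 < w.length := by
          simp only [PySem.Str.len_eq, String.length_toList] at h5; omega
        simp [filterComplexLoop, PySem.Str.len_eq, String.length_toList,
          show ¬ 10 < w.length by omega, h5n, h10n, List.filter_cons, ih]

-- the cutoff prefix is the ≤10-takeWhile
theorem take_findCutoff (lens : List Int) :
    lens.take (findCutoff lens) = lens.takeWhile (fun l => l ≤ 10) := by
  induction lens with
  | nil => simp [findCutoff]
  | cons l rest ih =>
    by_cases h : l > 10
    · simp [findCutoff, h, List.takeWhile_cons, show ¬ l ≤ 10 by omega]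
    · simp [findCutoff, h, List.takeWhile_cons, show l ≤ 10 by omega, ih]

-- summing the selected buckets of Counter(p) counts the selected elements of p
theorem sum_counter_buckets (p : List Int) :
    (PySem.Dict.counter p).items.foldl (fun s pr => if pr.1 > 5 then s + pr.2 else s) 0 =
      ((p.filter (fun l => l > 5)).length : Int) := by
  rw [PySem.List.foldl_ite_eq_foldl_filter (p := fun pr : Int × Int => pr.1 > 5)
      (f := fun s pr => s + pr.2),
    PySem.List.foldl_add (g := fun pr : Int × Int => pr.2),
    PySem.Dict.items_counter]
  have hperm : (PySem.Set.ofList p).Perm p.dedup := by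
    apply (List.perm_ext_iff_of_nodup (PySem.Set.nodup_ofList p) p.nodup_dedup).mpr
    intro x; rw [PySem.Set.mem_ofList, List.mem_dedup]
  calc 0 + ((((PySem.Set.ofList p).map (fun k => (k, (p.count k : Int)))).filter
            (fun pr => decide (pr.1 > 5))).map (fun pr => pr.2)).sum
      = (((PySem.Set.ofList p).filter (fun l => decide (l > 5))).map
            (fun k => (p.count k : Int))).sum := by
        rw [zero_add, List.filter_map, List.map_map]; rfl
    _ = ((p.dedup.filter (fun l => decide (l > 5))).map (fun k => (p.count k : Int))).sum := by
        exact List.Perm.sum_eq (List.Perm.map _ (List.Perm.filter _ hperm))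
    _ = (((p.dedup.filter (fun l => decide (l > 5))).map (fun k => p.count k)).sum : Int) := by
        rw [Nat.cast_list_sum, List.map_map]; rfl
    _ = ((p.filter (fun l => l > 5)).length : Int) := by
        rw [List.sum_map_count_dedup_filter_eq_countP, List.countP_eq_length_filter]

-- ===== VERDICT (by name: the statement is the Claim_ definition above) =====
theorem filter_complex_words_spec : Claim_equal_filter_complex_words := by
  intro ws _
  unfold Spec_filter_complex_words filter_complex_words filter_complex_words_alt
  simp only []
  rw [take_findCutoff, sum_counter_buckets, filterComplexLoop_eq, List.takeWhile_map,
    List.filter_map, List.length_map, zero_add]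
  rfl
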